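-- pv_equiv track=rewrite | github.com/WASP-SYSTEMS/wespenstock | eval/graphs.py | _compute_max_columns
-- ===== SOURCE A (Python) =====
-- BASE_VALUE_GROUPS = {
--     "Tokens": ["total_tokens", "prompt_tokens", "completion_tokens"],
--     "LLM Interactions": [
--         "tool_calls_total",
--         "tool_calls_success",
--         "tool_calls_failure",
--         "motivator_node_calls",
--         "llm_invocations",
--     ],
--     "Errors": [],  # dynamically filled
--     "Prediction": ["secure", "vulnerable"],
--     "PoVs": ["successful_povs", "failed_povs"],
-- }
--
-- def _compute_max_columns(agents: list[str]) -> int: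
--     return max(
--         sum(
--             not ((name == "Prediction" and agent != "analyzer") or (name == "PoVs" and agent != "verifier"))
--             for name in BASE_VALUE_GROUPS
--         )
--         for agent in agents
--     )
-- ===== SOURCE B (Python) =====
-- def _compute_max_columns(agents: list[str]) -> int:
--     # Each agent sees the 5 base groups minus the excluded ones: "Prediction"
--     # only for "analyzer", "PoVs" only for "verifier" (no agent is both),
--     # so the per-agent count is 4 for those two agents and 3 otherwise.
--     return max(4 if agent in ("analyzer", "verifier") else 3 for agent in agents)
-- ===== Notes on version B (the rewrite author's own statement) =====
-- stated objective: faster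
-- what changed: Replaces the per-agent inner loop over the five BASE_VALUE_GROUPS keys by the closed-form per-agent count (4 for analyzer/verifier, 3 otherwise), keeping only the outer max; drops the constant factor of the inner loop.
import Mathlib
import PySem

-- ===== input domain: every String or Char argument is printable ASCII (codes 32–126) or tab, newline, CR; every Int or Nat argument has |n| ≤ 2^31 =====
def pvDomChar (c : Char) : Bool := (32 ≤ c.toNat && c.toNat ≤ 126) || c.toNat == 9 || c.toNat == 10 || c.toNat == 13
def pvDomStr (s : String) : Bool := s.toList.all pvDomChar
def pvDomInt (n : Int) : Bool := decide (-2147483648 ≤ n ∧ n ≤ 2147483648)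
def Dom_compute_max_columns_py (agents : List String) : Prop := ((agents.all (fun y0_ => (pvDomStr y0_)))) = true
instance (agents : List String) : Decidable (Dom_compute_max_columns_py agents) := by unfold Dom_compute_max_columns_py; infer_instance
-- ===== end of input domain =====

-- B replaces A's per-agent loop over the five group names by the closed-form per-agent count (simpler).


-- ===== PORT A =====
-- keys of BASE_VALUE_GROUPS in insertion order (the values are never used by A)
def pvBaseGroupNames : List String :=
  ["Tokens", "LLM Interactions", "Errors", "Prediction", "PoVs"]

-- inner sum: sum over the group names of the 0/1 value of the boolean
def pvAgentSum (agent : String) : Int :=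
  pvBaseGroupNames.foldl
    (fun s name =>
      s + (if ¬((name == "Prediction" && agent != "analyzer")
                || (name == "PoVs" && agent != "verifier")) then (1 : Int) else 0))
    0

def compute_max_columns_py (agents : List String) : Int :=
  (PySem.List.max? (agents.map pvAgentSum) (fun x => x)).getD 0

-- ===== PORT B =====
def compute_max_columns_py_alt (agents : List String) : Int :=
  (PySem.List.max?
    (agents.map (fun agent =>
      if agent == "analyzer" || agent == "verifier" then (4 : Int) else 3))
    (fun x => x)).getD 0

-- ===== PRECONDITION & SPEC =====
-- Python's max raises ValueError on an empty sequence, in both A and B.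
def Pre_compute_max_columns_py (agents : List String) : Prop := agents ≠ []
instance (agents : List String) : Decidable (Pre_compute_max_columns_py agents) := by
  unfold Pre_compute_max_columns_py; infer_instance

def pvWitness_compute_max_columns_py : List String := ["analyzer", "other"]

def Spec_compute_max_columns_py (agents : List String) (out : Int) : Prop := out = compute_max_columns_py_alt agents
instance (agents : List String) (out : Int) : Decidable (Spec_compute_max_columns_py agents out) := by unfold Spec_compute_max_columns_py; infer_instance

-- ===== CLAIM (what is proved, stated in full; the proofs are below) =====
def Claim_equal_compute_max_columns_py : Prop := ∀ (agents : List String), Dom_compute_max_columns_py agents → Pre_compute_max_columns_py agents → Spec_compute_max_columns_py agents (compute_max_columns_py agents)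

-- ===== LEMMAS AND PROOFS =====
-- the two per-agent scores coincide on every agent string
theorem pvAgentSum_eq (agent : String) :
    pvAgentSum agent
      = (if agent == "analyzer" || agent == "verifier" then (4 : Int) else 3) := by
  by_cases h1 : agent == "analyzer" <;> by_cases h2 : agent == "verifier" <;>
    simp_all [pvAgentSum, pvBaseGroupNames, List.foldl]

-- ===== VERDICT (by name: the statement is the Claim_ definition above) =====
theorem compute_max_columns_py_spec : Claim_equal_compute_max_columns_py := by
  intro agents _ _
  unfold Spec_compute_max_columns_py compute_max_columns_py compute_max_columns_py_alt
  rw [List.map_congr_left (fun a _ => pvAgentSum_eq a)]
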